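-- pv_equiv track=rewrite | github.com/collinsakenga/codewars_solutions | 6 kyu/Word Mesh.py | word_mesh
-- ===== SOURCE A (Python) =====
-- def word_mesh(arr):
--     word=""
--     for i in range(len(arr)-1):
--         index=1
--         comp=min(len(arr[i]), len(arr[i+1]))
--         check=""
--         while index<=comp:
--             if arr[i][len(arr[i])-index:]==arr[i+1][0:index]:
--                 check=arr[i+1][0:index]
--             index+=1
--         if not check:
--             return "failed to mesh"
--         word+=check
--         index+=1
--     return word
-- ===== SOURCE B (Python) =====
-- def _prefix_function(p):
--     pi = [0] * len(p)
--     k = 0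
--     for i in range(1, len(p)):
--         while k > 0 and p[i] != p[k]:
--             k = pi[k - 1]
--         if p[i] == p[k]:
--             k += 1
--         pi[i] = k
--     return pi
--
--
-- def _overlap(a, b):
--     """Length of the longest suffix of a that is a prefix of b (KMP automaton)."""
--     if not b:
--         return 0
--     pi = _prefix_function(b)
--     k = 0
--     for c in a:
--         if k == len(b):
--             k = pi[k - 1]
--         while k > 0 and b[k] != c:
--             k = pi[k - 1]
--         if b[k] == c:
--             k += 1
--     return k
--
--
-- def word_mesh(arr):
--     pieces = []
--     for a, b in zip(arr, arr[1:]):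
--         k = _overlap(a, b)
--         if k == 0:
--             return "failed to mesh"
--         pieces.append(b[:k])
--     return "".join(pieces)
-- ===== Notes on version B (the rewrite author's own statement) =====
-- stated objective: alternative
-- what changed: B computes each consecutive pair's longest suffix-prefix overlap with a KMP automaton (prefix function of the second word, then a single scan of the first word), replacing A's scan that tests every overlap length by slicing and comparing.
import Mathlib
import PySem

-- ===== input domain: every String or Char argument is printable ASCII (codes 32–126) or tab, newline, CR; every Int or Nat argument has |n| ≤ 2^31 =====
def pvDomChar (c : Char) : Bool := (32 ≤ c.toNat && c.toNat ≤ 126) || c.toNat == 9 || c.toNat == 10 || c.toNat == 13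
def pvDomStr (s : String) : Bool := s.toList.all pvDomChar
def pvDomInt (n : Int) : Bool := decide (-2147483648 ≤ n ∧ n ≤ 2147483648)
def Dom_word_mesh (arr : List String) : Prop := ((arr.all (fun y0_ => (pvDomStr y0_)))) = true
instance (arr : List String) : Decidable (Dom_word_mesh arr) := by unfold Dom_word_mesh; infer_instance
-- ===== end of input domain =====

-- B replaces A's per-pair scan that compares every suffix-length slice by a KMP automaton:
-- prefix function of the second word, one scan of the first (objective: alternative).

-- ===== PORT A =====
-- inner while loop of A: index = 1 .. comp, check := last matching prefix
def pvAInner (s t : List Char) : List Char :=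
  (PySem.List.pyRange 1 ((min s.length t.length : Int) + 1) 1).foldl
    (fun check index =>
      if PySem.List.slice s (some ((s.length : Int) - index)) none
           = PySem.List.slice t (some 0) (some index)
      then PySem.List.slice t (some 0) (some index) else check) []

-- outer for loop of A with its early `return "failed to mesh"`
def pvALoop (arr : List String) (idxs : List Int) (word : List Char) : List Char :=
  match idxs with
  | [] => word
  | i :: rest =>
    let check := pvAInner (PySem.List.pyGetD arr i "").toList (PySem.List.pyGetD arr (i + 1) "").toList
    if check = [] then "failed to mesh".toList
    else pvALoop arr rest (word ++ check)

def word_mesh (arr : List String) : String :=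
  String.ofList (pvALoop arr (PySem.List.pyRange 0 ((arr.length : Int) - 1) 1) [])

-- ===== PORT B =====
-- B's `while k > 0 and p[k] != c: k = pi[k-1]`; the fuel is the entry value of k, which
-- bounds the iteration count because pi[k-1] ≤ k-1 makes k strictly decrease
def pvFall (p : List Char) (pf : List Nat) (c : Char) : Nat → Nat → Nat
  | 0, k => k
  | fuel + 1, k =>
    if k ≠ 0 ∧ p.getD k ' ' ≠ c then pvFall p pf c fuel (pf.getD (k - 1) 0) else k

-- body of the `for i in range(1, len(p))` loop of _prefix_function
def pvPStep (p : List Char) (st : List Nat × Nat) (i : Nat) : List Nat × Nat :=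
  let k1 := pvFall p st.1 (p.getD i ' ') st.2 st.2
  let k2 := if p.getD i ' ' = p.getD k1 ' ' then k1 + 1 else k1
  (st.1.set i k2, k2)

-- _prefix_function(p)
def pvPrefixFun (p : List Char) : List Nat :=
  ((List.range' 1 (p.length - 1)).foldl (pvPStep p) (List.replicate p.length 0, 0)).1

-- body of the `for c in a` loop of _overlap
def pvOStep (b : List Char) (pf : List Nat) (k : Nat) (c : Char) : Nat :=
  let k1 := if k = b.length then pf.getD (k - 1) 0 else k
  let k2 := pvFall b pf c k1 k1
  if b.getD k2 ' ' = c then k2 + 1 else k2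

-- _overlap(a, b)
def pvOverlap (a b : List Char) : Nat :=
  if b = [] then 0 else a.foldl (pvOStep b (pvPrefixFun b)) 0

-- B's outer loop: collect pieces, early `return "failed to mesh"` as none
def pvBLoop (pairs : List (String × String)) (pieces : List (List Char)) : Option (List (List Char)) :=
  match pairs with
  | [] => some pieces
  | (a, b) :: rest =>
    let k := pvOverlap a.toList b.toList
    if k = 0 then none
    else pvBLoop rest (pieces ++ [b.toList.take k])

def word_mesh_alt (arr : List String) : String :=
  match pvBLoop (arr.zip (PySem.List.slice arr (some 1) none)) [] with
  | some pieces => String.ofList pieces.flatten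
  | none => "failed to mesh"

-- ===== PRECONDITION & SPEC =====
def Spec_word_mesh (arr : List String) (out : String) : Prop := out = word_mesh_alt arr
instance (arr : List String) (out : String) : Decidable (Spec_word_mesh arr out) := by unfold Spec_word_mesh; infer_instance

-- ===== CLAIM (what is proved, stated in full; the proofs are below) =====
def Claim_equal_word_mesh : Prop := ∀ (arr : List String), Dom_word_mesh arr → Spec_word_mesh arr (word_mesh arr)

-- ===== LEMMAS AND PROOFS =====

-- generic list facts ---------------------------------------------------------

theorem pv_len_take (p : List Char) (j : Nat) (h : j ≤ p.length) : (p.take j).length = j := by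
  simp [List.length_take]; omega

theorem pv_suffix_of_suffix_le {u v t : List Char} (hu : u <:+ t) (hv : v <:+ t)
    (h : u.length ≤ v.length) : u <:+ v := by
  have h3 := List.prefix_of_prefix_length_le hu.reverse hv.reverse (by simpa using h)
  simpa using h3.reverse

theorem pv_take_succ (p : List Char) (k : Nat) (hk : k < p.length) :
    p.take (k + 1) = p.take k ++ [p.getD k ' '] := by
  rw [List.take_add_one]
  simp [List.getD, List.getElem?_eq_getElem hk]

theorem pv_suffix_append_single {u t : List Char} (c : Char) (h : u <:+ t) :
    u ++ [c] <:+ t ++ [c] := by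
  obtain ⟨s, rfl⟩ := h
  exact ⟨s, by simp⟩

theorem pv_suffix_snoc_decomp (p t : List Char) (c : Char) (j : Nat)
    (hj1 : 1 ≤ j) (hjn : j ≤ p.length) (h : p.take j <:+ t ++ [c]) :
    p.take (j - 1) <:+ t ∧ p.getD (j - 1) ' ' = c := by
  have hlt : j - 1 < p.length := by omega
  rw [show j = (j - 1) + 1 by omega, pv_take_succ p (j - 1) hlt] at h
  obtain ⟨s, hs⟩ := h
  rw [← List.append_assoc] at hs
  have h2 := List.append_inj' hs rfl
  refine ⟨⟨s, h2.1⟩, ?_⟩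
  simpa using h2.2

-- specification predicates ---------------------------------------------------

-- pf.getD i 0 is the longest proper border of p.take (i+1)
def pvPiSpec (p : List Char) (pf : List Nat) (i : Nat) : Prop :=
  pf.getD i 0 ≤ i ∧ p.take (pf.getD i 0) <:+ p.take (i + 1) ∧
    ∀ j, j ≤ i → p.take j <:+ p.take (i + 1) → j ≤ pf.getD i 0

-- K is the longest prefix of b that is a suffix of t
def pvOInv (b t : List Char) (K : Nat) : Prop :=
  K ≤ b.length ∧ b.take K <:+ t ∧ ∀ j, j ≤ b.length → b.take j <:+ t → j ≤ K

-- the fall loop --------------------------------------------------------------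

theorem pv_fall_spec (p : List Char) (pf : List Nat) (c : Char) (t : List Char) (m B : Nat)
    (hm : m ≤ p.length) (hpi : ∀ i, i < B → pvPiSpec p pf i) :
    ∀ (fuel K : Nat), K ≤ fuel → K ≤ B → K < p.length →
      p.take K <:+ t →
      (∀ j, j < m → p.take j <:+ t → p.getD j ' ' = c → j ≤ K) →
      (pvFall p pf c fuel K < p.length ∧ p.take (pvFall p pf c fuel K) <:+ t ∧
       (∀ j, j < m → p.take j <:+ t → p.getD j ' ' = c → j ≤ pvFall p pf c fuel K) ∧
       (pvFall p pf c fuel K = 0 ∨ p.getD (pvFall p pf c fuel K) ' ' = c) ∧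
       pvFall p pf c fuel K ≤ K) := by
  intro fuel
  induction fuel with
  | zero =>
    intro K hfuel hKB hKn hsuf hmax
    have hK0 : K = 0 := by omega
    subst hK0
    exact ⟨hKn, hsuf, hmax, Or.inl rfl, le_refl _⟩
  | succ f ih =>
    intro K hfuel hKB hKn hsuf hmax
    by_cases hcond : K ≠ 0 ∧ p.getD K ' ' ≠ c
    · have hstep : pvFall p pf c (f + 1) K = pvFall p pf c f (pf.getD (K - 1) 0) := by
        simp only [pvFall, if_pos hcond]
      have hK1B : K - 1 < B := by omega
      have spec := hpi (K - 1) hK1B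
      have hKrw : (K - 1) + 1 = K := by omega
      rw [pvPiSpec, hKrw] at spec
      have hK'le : pf.getD (K - 1) 0 ≤ K - 1 := spec.1
      have hsuf' : p.take (pf.getD (K - 1) 0) <:+ t := spec.2.1.trans hsuf
      have hmax' : ∀ j, j < m → p.take j <:+ t → p.getD j ' ' = c → j ≤ pf.getD (K - 1) 0 := by
        intro j hj hjs hjc
        have hjK : j ≤ K := hmax j hj hjs hjc
        have hjne : j ≠ K := fun h => hcond.2 (h ▸ hjc)
        have hjsub : p.take j <:+ p.take K :=
          pv_suffix_of_suffix_le hjs hsuf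
            (by rw [pv_len_take p j (by omega), pv_len_take p K (by omega)]; omega)
        exact spec.2.2 j (by omega) hjsub
      have hres := ih (pf.getD (K - 1) 0) (by omega) (by omega) (by omega) hsuf' hmax'
      rw [hstep]
      exact ⟨hres.1, hres.2.1, hres.2.2.1, hres.2.2.2.1, hres.2.2.2.2.trans (by omega)⟩
    · have hstep : pvFall p pf c (f + 1) K = K := by
        simp only [pvFall, if_neg hcond]
      rw [hstep]
      refine ⟨hKn, hsuf, hmax, ?_, le_refl _⟩
      by_cases h0 : K = 0
      · exact Or.inl h0
      · exact Or.inr (by by_contra hne; exact hcond ⟨h0, hne⟩)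

-- prefix-function correctness ------------------------------------------------

def pvPInv (p : List Char) (st : List Nat × Nat) (i : Nat) : Prop :=
  st.1.length = p.length ∧ st.2 = st.1.getD (i - 1) 0 ∧ ∀ j, j < i → pvPiSpec p st.1 j

theorem pv_pstep_inv (p : List Char) (st : List Nat × Nat) (i : Nat)
    (h1 : 1 ≤ i) (h2 : i < p.length) (h : pvPInv p st i) :
    pvPInv p (pvPStep p st i) (i + 1) := by
  obtain ⟨piL, k⟩ := st
  obtain ⟨hlen, hk, hspecs⟩ := h
  simp only at hlen hk
  have spec := hspecs (i - 1) (by omega)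
  have hirw : (i - 1) + 1 = i := by omega
  rw [pvPiSpec, hirw, ← hk] at spec
  have hfall := pv_fall_spec p piL (p.getD i ' ') (p.take i) i (i - 1)
    (by omega) (fun j hj => hspecs j (by omega)) k k (le_refl k) (by omega) (by omega)
    spec.2.1
    (fun j hj hjs _ => spec.2.2 j (by omega) hjs)
  set K2 := pvFall p piL (p.getD i ' ') k k with hK2
  set k2 := if p.getD i ' ' = p.getD K2 ' ' then K2 + 1 else K2 with hk2
  have hK2le : K2 ≤ k := hfall.2.2.2.2
  have hk2i : k2 ≤ i := by
    rw [hk2]; split <;> omega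
  have htakei1 : p.take (i + 1) = p.take i ++ [p.getD i ' '] := pv_take_succ p i h2
  have hnew : pvPiSpec p (piL.set i k2) i := by
    have hgd : (piL.set i k2).getD i 0 = k2 := by
      simp [List.getD, show i < piL.length by omega]
    refine ⟨by rw [hgd]; exact hk2i, ?_, ?_⟩
    · rw [hgd, htakei1, hk2]
      split
      · rename_i hc
        have hts : p.take (K2 + 1) = p.take K2 ++ [p.getD i ' '] := by
          rw [pv_take_succ p K2 hfall.1, hc]
        rw [hts]
        exact pv_suffix_append_single _ hfall.2.1
      · rename_i hc
        rcases hfall.2.2.2.1 with h0 | hc2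
        · rw [h0]; exact List.nil_suffix
        · exact absurd hc2.symm hc
    · intro j hj hjs
      rw [hgd]
      rcases Nat.eq_zero_or_pos j with rfl | hj1
      · omega
      rw [htakei1] at hjs
      obtain ⟨hjt, hjc⟩ := pv_suffix_snoc_decomp p (p.take i) (p.getD i ' ') j hj1 (by omega) hjs
      have hjK2 : j - 1 ≤ K2 := hfall.2.2.1 (j - 1) (by omega) hjt hjc
      rw [hk2]
      split
      · omega
      · rename_i hc
        have hK20 : K2 = 0 := by
          rcases hfall.2.2.2.1 with h0 | hc2
          · exact h0
          · exact absurd hc2.symm hc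
        have hj1' : j = 1 := by omega
        subst hj1'
        rw [hK20] at hc
        simp only [Nat.sub_self] at hjc
        exact absurd hjc.symm hc
  refine ⟨by simp [pvPStep, hlen], ?_, ?_⟩
  · simp only [pvPStep, ← hK2, ← hk2]
    simp [List.getD, show i < piL.length by omega]
  · intro j hj
    simp only [pvPStep, ← hK2, ← hk2]
    rcases Nat.lt_or_ge j i with hji | hji
    · have hold := hspecs j hji
      have hgd : (piL.set i k2).getD j 0 = piL.getD j 0 := by
        simp [List.getD, show ¬ i = j by omega]
      rw [pvPiSpec, hgd]
      exact hold
    · have hji' : j = i := by omega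
      subst hji'
      exact hnew

theorem pv_pf_fold (p : List Char) :
    ∀ (m i : Nat) (st : List Nat × Nat), 1 ≤ i → i + m = p.length → pvPInv p st i →
      ∀ j, j < p.length → pvPiSpec p ((List.range' i m).foldl (pvPStep p) st).1 j := by
  intro m
  induction m with
  | zero =>
    intro i st h1 h2 hinv j hj
    simpa using hinv.2.2 j (by omega)
  | succ m ih =>
    intro i st h1 h2 hinv j hj
    rw [List.range'_succ, List.foldl_cons]
    exact ih (i + 1) (pvPStep p st i) (by omega) (by omega)
      (pv_pstep_inv p st i h1 (by omega) hinv) j hj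

theorem pv_pf_spec (p : List Char) (hp : p ≠ []) :
    ∀ j, j < p.length → pvPiSpec p (pvPrefixFun p) j := by
  have hn : 1 ≤ p.length := List.length_pos_iff.mpr hp
  intro j hj
  refine pv_pf_fold p (p.length - 1) 1 (List.replicate p.length 0, 0) (le_refl 1) (by omega)
    ⟨by simp, by simp [List.getD], ?_⟩ j hj
  intro j hj
  have hj0 : j = 0 := by omega
  subst hj0
  refine ⟨by simp [List.getD], by simp [List.getD], ?_⟩
  intro j hj _
  simp [List.getD]
  omega

-- the overlap scan -----------------------------------------------------------

theorem pv_ostep_inv (b : List Char) (pf : List Nat) (hb : b ≠ [])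
    (hpi : ∀ i, i < b.length → pvPiSpec b pf i)
    (t : List Char) (c : Char) (K : Nat) (h : pvOInv b t K) :
    pvOInv b (t ++ [c]) (pvOStep b pf K c) := by
  have hn : 1 ≤ b.length := List.length_pos_iff.mpr hb
  obtain ⟨hKn, hsuf, hmax⟩ := h
  -- the reset step: K1 < |b|, still a border of t, still dominates all borders < |b|
  have hK1ex : ∃ K1, (if K = b.length then pf.getD (K - 1) 0 else K) = K1 ∧
      K1 < b.length ∧ b.take K1 <:+ t ∧
      (∀ j, j < b.length → b.take j <:+ t → j ≤ K1) := by
    by_cases hfull : K = b.length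
    · subst hfull
      have spec := hpi (b.length - 1) (by omega)
      have hrw : (b.length - 1) + 1 = b.length := by omega
      rw [pvPiSpec, hrw, List.take_length] at spec
      have hbt : b <:+ t := by
        rw [List.take_length] at hsuf; exact hsuf
      refine ⟨pf.getD (b.length - 1) 0, by simp, by omega, spec.2.1.trans hbt, ?_⟩
      intro j hj hjs
      refine spec.2.2 j (by omega) ?_
      exact pv_suffix_of_suffix_le hjs hbt (by rw [pv_len_take b j (by omega)]; omega)
    · exact ⟨K, by simp [hfull], by omega, hsuf,
        fun j hj hjs => hmax j (by omega) hjs⟩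
  obtain ⟨K1, hK1eq, hK1n, hK1suf, hK1max⟩ := hK1ex
  have hfall := pv_fall_spec b pf c t b.length b.length (le_refl _) hpi K1 K1
    (le_refl K1) (by omega) hK1n hK1suf
    (fun j hj hjs _ => hK1max j hj hjs)
  have hres : pvOStep b pf K c
      = if b.getD (pvFall b pf c K1 K1) ' ' = c then pvFall b pf c K1 K1 + 1
        else pvFall b pf c K1 K1 := by
    simp only [pvOStep, hK1eq]
  set K2 := pvFall b pf c K1 K1 with hK2def
  rw [hres]
  split
  · rename_i hc
    refine ⟨by omega, ?_, ?_⟩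
    · rw [pv_take_succ b K2 hfall.1, hc]
      exact pv_suffix_append_single c hfall.2.1
    · intro j hj hjs
      rcases Nat.eq_zero_or_pos j with rfl | hj1
      · omega
      obtain ⟨hjt, hjc⟩ := pv_suffix_snoc_decomp b t c j hj1 hj hjs
      have := hfall.2.2.1 (j - 1) (by omega) hjt hjc
      omega
  · rename_i hc
    have hK20 : K2 = 0 := by
      rcases hfall.2.2.2.1 with h0 | hc2
      · exact h0
      · exact absurd hc2 hc
    refine ⟨by omega, by rw [hK20]; exact List.nil_suffix, ?_⟩
    intro j hj hjs
    rcases Nat.eq_zero_or_pos j with rfl | hj1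
    · omega
    obtain ⟨hjt, hjc⟩ := pv_suffix_snoc_decomp b t c j hj1 hj hjs
    have hj2 : j - 1 ≤ K2 := hfall.2.2.1 (j - 1) (by omega) hjt hjc
    have hj1' : j = 1 := by omega
    subst hj1'
    rw [hK20] at hc
    simp only [Nat.sub_self] at hjc
    exact absurd hjc hc

theorem pv_ofold_inv (b : List Char) (pf : List Nat) (hb : b ≠ [])
    (hpi : ∀ i, i < b.length → pvPiSpec b pf i) :
    ∀ (a t : List Char) (K : Nat), pvOInv b t K →
      pvOInv b (t ++ a) (a.foldl (pvOStep b pf) K) := by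
  intro a
  induction a with
  | nil => intro t K h; simpa using h
  | cons c a' ih =>
    intro t K h
    rw [List.foldl_cons, show t ++ c :: a' = (t ++ [c]) ++ a' by simp]
    exact ih (t ++ [c]) _ (pv_ostep_inv b pf hb hpi t c K h)

theorem pv_overlap_inv (a b : List Char) : pvOInv b a (pvOverlap a b) := by
  by_cases hb : b = []
  · subst hb
    refine ⟨by simp [pvOverlap], by simp, ?_⟩
    intro j hj _
    simp only [List.length_nil, Nat.le_zero] at hj
    simp [pvOverlap, hj]
  · have hinit : pvOInv b [] 0 := by
      refine ⟨by omega, List.nil_suffix, ?_⟩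
      intro j hj hjs
      have h1 : b.take j = [] := List.eq_nil_of_suffix_nil hjs
      have h2 := pv_len_take b j hj
      rw [h1] at h2
      simp at h2
      omega
    have := pv_ofold_inv b (pvPrefixFun b) hb (pv_pf_spec b hb) a [] 0 hinit
    rw [List.nil_append] at this
    rw [pvOverlap, if_neg hb]
    exact this

-- A's inner loop = the longest overlap (last match of the ascending scan) ----

theorem pv_foldl_last_eq_find_rev {α : Type} (l : List Int) (p : Int → Bool) (f : Int → α) (d : α) :
    l.foldl (fun acc k => if p k then f k else acc) d
      = (match l.reverse.find? p with | some k => f k | none => d) := by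
  induction l generalizing d with
  | nil => simp
  | cons x xs ih =>
    simp only [List.foldl_cons, List.reverse_cons, List.find?_append]
    rw [ih]
    cases hx : xs.reverse.find? p with
    | some k => simp
    | none => by_cases hp : p x <;> simp [hp]

theorem pv_find_rev (q : Int → Bool) :
    ∀ (m K : Nat), K ≤ m → (∀ j : Nat, K < j → j ≤ m → q j = false) → (K ≠ 0 → q K = true) →
      ((PySem.List.pyRange 1 ((m : Int) + 1) 1).reverse).find? q
        = if K = 0 then none else some (K : Int) := by
  intro m
  induction m with
  | zero =>
    intro K hK _ _
    have hK0 : K = 0 := by omega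
    subst hK0
    rw [PySem.List.pyRange_one_eq_nil (by omega)]
    simp
  | succ m ih =>
    intro K hK hq1 hq2
    have hsplit : PySem.List.pyRange 1 (((m + 1 : Nat) : Int) + 1) 1
        = PySem.List.pyRange 1 ((m : Int) + 1) 1 ++ [((m : Int) + 1)] := by
      push_cast
      exact PySem.List.pyRange_one_succ_right (by omega)
    rw [hsplit, List.reverse_append]
    simp only [List.reverse_singleton, List.singleton_append, List.find?_cons]
    cases hq : q ((m : Int) + 1) with
    | true =>
      have hKm : K = m + 1 := by
        by_contra hne
        have : q ((m + 1 : Nat) : Int) = false := hq1 (m + 1) (by omega) (by omega)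
        rw [show (((m + 1 : Nat)) : Int) = (m : Int) + 1 by push_cast; ring] at this
        rw [this] at hq
        exact Bool.noConfusion hq
      subst hKm
      rw [if_neg (by omega)]
      push_cast
      rfl
    | false =>
      have hKm : K ≠ m + 1 := by
        intro h
        subst h
        have := hq2 (by omega)
        rw [show (((m + 1 : Nat)) : Int) = (m : Int) + 1 by push_cast; ring] at this
        rw [this] at hq
        exact Bool.noConfusion hq
      exact ih K (by omega) (fun j h1 h2 => hq1 j h1 (by omega)) hq2

-- A's slice comparison at length k is `endswith` of the k-prefix
theorem pv_cond_eq (s t : List Char) (k : Int) (hk1 : 1 ≤ k)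
    (hk2 : k ≤ (min s.length t.length : Int)) :
    (decide (PySem.List.slice s (some ((s.length : Int) - k)) none
       = PySem.List.slice t (some 0) (some k)))
      = PySem.Chars.endswith s (t.take k.toNat) := by
  have hks : k.toNat ≤ s.length := by omega
  have hkt : k.toNat ≤ t.length := by omega
  have h0 : (0 : Int) ≤ (s.length : Int) - k := by omega
  rw [PySem.List.slice_from s h0, PySem.List.slice_zero_start,
      PySem.List.slice_to t (by omega : (0 : Int) ≤ k)]
  have hd : ((s.length : Int) - k).toNat = s.length - k.toNat := by omega
  rw [hd]
  have hlen : (t.take k.toNat).length = k.toNat := by simp [hkt]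
  cases hb : PySem.Chars.endswith s (t.take k.toNat) with
  | false =>
    simp only [decide_eq_false_iff_not]
    intro heq
    have hsuf : t.take k.toNat <:+ s := heq ▸ List.drop_suffix _ _
    have htrue := (PySem.Chars.endswith_iff (s := s) (p := t.take k.toNat)).mpr hsuf
    simp [htrue] at hb
  | true =>
    simp only [decide_eq_true_eq]
    obtain ⟨pre, hpre⟩ := (PySem.Chars.endswith_iff (s := s) (p := t.take k.toNat)).mp hb
    rw [← hpre]
    have hplen : (pre ++ t.take k.toNat).length - k.toNat = pre.length := by
      simp [hlen]
    rw [hplen]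
    simp

theorem pv_inner_eq (s t : List Char) : pvAInner s t = t.take (pvOverlap s t) := by
  obtain ⟨hKn, hsuf, hmax⟩ := pv_overlap_inv s t
  have hKs : pvOverlap s t ≤ s.length := by
    have hl := hsuf.length_le
    rw [pv_len_take t _ hKn] at hl
    exact hl
  have hKm : pvOverlap s t ≤ min s.length t.length := by omega
  unfold pvAInner
  -- replace the slice comparison by endswith of the k-prefix
  have hfold := PySem.List.foldl_congr_mem
    (PySem.List.pyRange 1 ((min s.length t.length : Int) + 1) 1)
    (fun check index =>
      if PySem.List.slice s (some ((s.length : Int) - index)) none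
           = PySem.List.slice t (some 0) (some index)
      then PySem.List.slice t (some 0) (some index) else check)
    (fun check index =>
      if PySem.Chars.endswith s (t.take index.toNat)
      then PySem.List.slice t (some 0) (some index) else check)
    []
    (by
      intro acc k hk
      beta_reduce
      rw [PySem.List.mem_pyRange_one] at hk
      obtain ⟨hk1, hk2⟩ := hk
      have hcond := pv_cond_eq s t k hk1 (by omega)
      by_cases h : PySem.List.slice s (some ((s.length : Int) - k)) none
           = PySem.List.slice t (some 0) (some k)
      · have hb : PySem.Chars.endswith s (t.take k.toNat) = true := by
          rw [← hcond]; exact decide_eq_true h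
        rw [if_pos h, hb, if_pos rfl]
      · have hb : PySem.Chars.endswith s (t.take k.toNat) = false := by
          rw [← hcond]; exact decide_eq_false h
        rw [if_neg h, hb, if_neg (by simp)])
  rw [hfold]
  rw [pv_foldl_last_eq_find_rev _ _ (fun k => PySem.List.slice t (some 0) (some k)) []]
  rw [show (min (s.length : Int) (t.length : Int)) = ((min s.length t.length : Nat) : Int) by
    push_cast; ring]
  rw [pv_find_rev (fun k => PySem.Chars.endswith s (t.take k.toNat))
      (min s.length t.length) (pvOverlap s t) hKm ?_ ?_]
  · by_cases hK0 : pvOverlap s t = 0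
    · rw [hK0]
      simp
    · rw [if_neg hK0]
      simp only [PySem.List.slice_zero_start]
      rw [PySem.List.slice_to t (by omega)]
      simp
  · intro j hKj hjm
    beta_reduce
    cases hE : PySem.Chars.endswith s (t.take ((j : Int)).toNat) with
    | false => rfl
    | true =>
      have hsuf' := (PySem.Chars.endswith_iff _ _).mp hE
      rw [Int.toNat_natCast] at hsuf'
      have := hmax j (by omega) hsuf'
      omega
  · intro hK0
    beta_reduce
    rw [Int.toNat_natCast]
    exact (PySem.Chars.endswith_iff _ _).mpr hsuf

-- outer loops ----------------------------------------------------------------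

def pvM (pairs : List (String × String)) : Option (List (List Char)) :=
  match pairs with
  | [] => some []
  | (a, b) :: rest =>
    if pvOverlap a.toList b.toList = 0 then none
    else (pvM rest).map (b.toList.take (pvOverlap a.toList b.toList) :: ·)

theorem pv_bloop_eq (pairs : List (String × String)) (pieces : List (List Char)) :
    pvBLoop pairs pieces
      = (match pvM pairs with | some l => some (pieces ++ l) | none => none) := by
  induction pairs generalizing pieces with
  | nil => simp [pvBLoop, pvM]
  | cons p rest ih =>
    obtain ⟨a, b⟩ := p
    by_cases h0 : pvOverlap a.toList b.toList = 0
    · simp [pvBLoop, pvM, h0]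
    · simp only [pvBLoop, pvM, if_neg h0]
      rw [ih]
      cases pvM rest <;> simp

theorem pv_aloop_eq (arr : List String) :
    ∀ (n : Nat) (i : Int) (word : List Char), 0 ≤ i →
      n = ((arr.length : Int) - 1 - i).toNat →
      pvALoop arr (PySem.List.pyRange i ((arr.length : Int) - 1) 1) word
        = (match pvM ((arr.zip arr.tail).drop i.toNat) with
           | some l => word ++ l.flatten
           | none => "failed to mesh".toList) := by
  intro n
  induction n with
  | zero =>
    intro i word hi hn
    have hge : (arr.length : Int) - 1 ≤ i := by omega
    rw [PySem.List.pyRange_one_eq_nil hge]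
    have hlen : (arr.zip arr.tail).length ≤ i.toNat := by
      simp [List.length_zip, List.length_tail]; omega
    rw [List.drop_eq_nil_of_le hlen]
    simp [pvALoop, pvM]
  | succ m ih =>
    intro i word hi hn
    have hlt : i < (arr.length : Int) - 1 := by omega
    rw [PySem.List.pyRange_one_cons hlt]
    have hidx : i.toNat + 1 < arr.length := by omega
    have hidx0 : i.toNat < arr.length := by omega
    have hzlen : i.toNat < (arr.zip arr.tail).length := by
      simp [List.length_zip, List.length_tail]; omega
    have hdrop : (arr.zip arr.tail).drop i.toNat
        = (arr.zip arr.tail)[i.toNat] :: (arr.zip arr.tail).drop (i.toNat + 1) :=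
      List.drop_eq_getElem_cons hzlen
    have htail : i.toNat < arr.tail.length := by simp [List.length_tail]; omega
    have hget : (arr.zip arr.tail)[i.toNat] = (arr[i.toNat], arr[i.toNat + 1]) := by
      simp [List.getElem_zip, List.getElem_tail]
    have hgA : PySem.List.pyGetD arr i "" = arr[i.toNat] := by
      rw [PySem.List.pyGetD_of_nonneg arr "" hi]
      simp [List.getD_eq_getElem?_getD, List.getElem?_eq_getElem hidx0]
    have hgB : PySem.List.pyGetD arr (i + 1) "" = arr[i.toNat + 1] := by
      rw [PySem.List.pyGetD_of_nonneg arr "" (by omega : (0:Int) ≤ i + 1)]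
      have h1 : (i + 1).toNat = i.toNat + 1 := by omega
      rw [h1]
      simp [List.getD_eq_getElem?_getD, List.getElem?_eq_getElem hidx]
    simp only [pvALoop, hgA, hgB, hdrop, hget, pvM]
    rw [pv_inner_eq]
    obtain ⟨hKn, _, _⟩ := pv_overlap_inv arr[i.toNat].toList arr[i.toNat + 1].toList
    by_cases hK0 : pvOverlap arr[i.toNat].toList arr[i.toNat + 1].toList = 0
    · rw [hK0]
      simp
    · have hne : arr[i.toNat + 1].toList.take
          (pvOverlap arr[i.toNat].toList arr[i.toNat + 1].toList) ≠ [] := by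
        intro hnil
        have := pv_len_take arr[i.toNat + 1].toList _ hKn
        rw [hnil] at this
        simp at this
        omega
      rw [if_neg hne, if_neg hK0]
      have harg2 : m = ((arr.length : Int) - 1 - (i + 1)).toNat := by omega
      rw [ih (i + 1) _ (by omega) harg2]
      have h1 : (i + 1).toNat = i.toNat + 1 := by omega
      rw [h1]
      cases pvM ((arr.zip arr.tail).drop (i.toNat + 1)) <;> simp

-- ===== VERDICT (by name: the statement is the Claim_ definition above) =====
theorem word_mesh_spec : Claim_equal_word_mesh := by
  intro arr _
  unfold Spec_word_mesh word_mesh word_mesh_alt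
  rw [pv_aloop_eq arr ((arr.length : Int) - 1 - 0).toNat 0 [] le_rfl rfl]
  rw [pv_bloop_eq, PySem.List.slice_from_one]
  simp only [Int.toNat_zero, List.drop_zero]
  cases pvM (arr.zip arr.tail) with
  | some l => simp
  | none => simp
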